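-- pv_equiv track=rewrite | github.com/rramanujan/hymn-simulator | simulator.py | _inline_labels
-- ===== SOURCE A (Python) =====
-- def _inline_labels(program):
--     new_program = []
--     i = 0
--     while i < len(program):
--         line = program[i]
--         if line[-1] == ':' and i + 1 < len(program):
--             new_program.append('{} {}'.format(line, program[i+1]))
--             i += 1
--         else:
--             new_program.append(line)
--         i += 1
--     return new_program
-- ===== SOURCE B (Python) =====
-- def _inline_labels(program):
--     out = []
--     n = len(program)
--     i = 0
--     while i < n:
--         # find the maximal run of label lines starting at i
--         j = i
--         while j < n and program[j].endswith(':'):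
--             j += 1
--         run = program[i:j]
--         # pair the labels inside the run two by two
--         it = iter(run)
--         for a, b in zip(it, it):
--             out.append('{} {}'.format(a, b))
--         if len(run) % 2 == 1:
--             if j < n:
--                 out.append('{} {}'.format(run[-1], program[j]))
--             else:
--                 out.append(run[-1])
--         elif j < n:
--             out.append(program[j])
--         i = j + 1
--     return out
-- ===== Notes on version B (the rewrite author's own statement) =====
-- stated objective: alternative
-- what changed: Replaces A's one-by-one look-ahead scan (peek at program[i+1], skip with i += 2) with a run-decomposition algorithm: find each maximal run of consecutive ':'-ending label lines, pair the run's labels two by two via zip(it, it), and absorb the following plain line exactly when the run length is odd.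
import Mathlib
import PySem

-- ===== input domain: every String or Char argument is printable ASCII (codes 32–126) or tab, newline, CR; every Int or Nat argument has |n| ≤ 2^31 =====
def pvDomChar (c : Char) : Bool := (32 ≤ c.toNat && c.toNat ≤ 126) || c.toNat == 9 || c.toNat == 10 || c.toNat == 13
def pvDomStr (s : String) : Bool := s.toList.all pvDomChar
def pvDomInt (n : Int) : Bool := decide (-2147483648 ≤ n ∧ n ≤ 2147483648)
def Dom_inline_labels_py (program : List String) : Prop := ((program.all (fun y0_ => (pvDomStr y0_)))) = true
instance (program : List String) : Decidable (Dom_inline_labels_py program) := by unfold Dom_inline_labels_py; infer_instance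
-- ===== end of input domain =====

-- B replaces A's one-by-one look-ahead scan by a run decomposition: it finds each maximal run of
-- consecutive label lines, pairs the labels of the run two by two, and absorbs the following plain
-- line when the run length is odd; alternative algorithm, same asymptotic cost.

-- ===== PORT A =====
def inline_labels_py_go (program : List String) (i : Nat) : List String :=
  if _h : i < program.length then
    let line := program.getD i ""
    if PySem.Str.pyGet? line (-1) = some ':' ∧ i + 1 < program.length then
      (line ++ " " ++ program.getD (i+1) "") :: inline_labels_py_go program (i+2)
    else
      line :: inline_labels_py_go program (i+1)
  else []
termination_by program.length - i

def inline_labels_py (program : List String) : List String :=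
  inline_labels_py_go program 0

-- ===== PORT B =====
-- inner while: first index j ≥ start with j = len or not program[j].endswith(':')
def pv_findRun (program : List String) (j : Nat) : Nat :=
  if h : j < program.length ∧ PySem.Str.endswith (program.getD j "") ":" = true then
    pv_findRun program (j+1)
  else j
termination_by program.length - j
decreasing_by omega

-- transliteration of the `for a, b in zip(it, it)` pairing over the run (zip of one iterator
-- with itself consumes the list two elements at a time)
def pv_pairUp : List String → List String
  | [] => []
  | [_] => []
  | x :: y :: r => (x ++ " " ++ y) :: pv_pairUp r

-- lemma the port's own termination cites: the inner scan never moves left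
theorem pv_findRun_ge (program : List String) (j : Nat) : j ≤ pv_findRun program j := by
  fun_induction pv_findRun program j with
  | case1 j h ih => omega
  | case2 j h => omega

def inline_labels_py_alt_go (program : List String) (i : Nat) (out : List String) : List String :=
  if _h : i < program.length then
    let j := pv_findRun program i
    let run := PySem.List.slice program (some (i : Int)) (some (j : Int))
    let out1 := out ++ pv_pairUp run
    let out2 :=
      if run.length % 2 = 1 then
        if j < program.length then
          -- run[-1] is a valid index here: run has odd length, hence is nonempty
          out1 ++ [((PySem.List.pyGet? run (-1)).getD "") ++ " " ++ program.getD j ""]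
        else out1 ++ [(PySem.List.pyGet? run (-1)).getD ""]
      else if j < program.length then out1 ++ [program.getD j ""]
      else out1
    inline_labels_py_alt_go program (j + 1) out2
  else out
termination_by program.length - i
decreasing_by have := pv_findRun_ge program i; omega

def inline_labels_py_alt (program : List String) : List String :=
  inline_labels_py_alt_go program 0 []

-- ===== PRECONDITION & SPEC =====
-- Pre_ excludes exactly the programs on which Python A raises IndexError from line[-1]: those with
-- an empty line that the loop inspects, i.e. an empty line preceded by an EVEN number of
-- consecutive label lines (lines ending in ':'), since each odd-positioned line of a label run is
-- consumed as a label's follower and never inspected.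
def Pre_inline_labels_py (program : List String) : Prop :=
  ∀ j, j < program.length → program.getD j "" = "" →
    (((List.range j).takeWhile
        (fun t => PySem.Str.endswith (program.getD (j-1-t) "") ":")).length) % 2 = 1
instance (program : List String) : Decidable (Pre_inline_labels_py program) := by unfold Pre_inline_labels_py; infer_instance
def pvWitness_inline_labels_py : List String := ["loop:", "add 1", "halt"]

def Spec_inline_labels_py (program : List String) (out : List String) : Prop := out = inline_labels_py_alt program
instance (program : List String) (out : List String) : Decidable (Spec_inline_labels_py program out) := by unfold Spec_inline_labels_py; infer_instance

-- ===== CLAIM (what is proved, stated in full; the proofs are below) =====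
def Claim_equal_inline_labels_py : Prop := ∀ (program : List String), Dom_inline_labels_py program → Pre_inline_labels_py program → Spec_inline_labels_py program (inline_labels_py program)

-- ===== LEMMAS AND PROOFS =====

-- common structural description of the merged program
def pvMerge : List String → List String
  | [] => []
  | [x] => [x]
  | x :: y :: rest =>
      if PySem.Str.endswith x ":" = true then (x ++ " " ++ y) :: pvMerge rest
      else x :: pvMerge (y :: rest)

-- A's last-char test agrees with B's endswith test (both are false on the empty string)
lemma pv_last_eq_endswith (s : String) :
    (PySem.Str.pyGet? s (-1) = some ':') ↔ (PySem.Str.endswith s ":" = true) := by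
  simp only [PySem.Str.endswith_eq, PySem.Chars.endswith_iff, PySem.Str.pyGet?_eq,
    PySem.Chars.pyGet?_eq_listPyGet?, PySem.List.pyGet?_neg_one,
    List.getLast?_eq_some_iff, List.IsSuffix]
  exact ⟨fun ⟨l', h⟩ => ⟨l', h.symm⟩, fun ⟨t, h⟩ => ⟨t, h.symm⟩⟩

-- A's while-loop from index k computes pvMerge of the remaining suffix
lemma pv_goA (program : List String) :
    ∀ k, inline_labels_py_go program k = pvMerge (program.drop k) := by
  intro k
  fun_induction inline_labels_py_go program k with
  | case1 i h line hc ih =>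
      obtain ⟨h1, h2⟩ := hc
      rw [List.drop_eq_getElem_cons h, List.drop_eq_getElem_cons h2]
      have hline : line = program[i] := by simp [line, List.getElem?_eq_getElem h]
      rw [pvMerge]
      rw [if_pos (by rw [← hline]; exact (pv_last_eq_endswith line).mp h1)]
      rw [ih, ← hline]
      congr 1
      simp [List.getElem?_eq_getElem h2]
  | case2 i h line hc ih =>
      have hline : line = program[i] := by simp [line, List.getElem?_eq_getElem h]
      rw [List.drop_eq_getElem_cons h, ih, ← hline]
      by_cases h2 : i + 1 < program.length
      · have hns : ¬ (PySem.Str.endswith line ":" = true) := by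
          intro he; exact hc ⟨(pv_last_eq_endswith line).mpr he, h2⟩
        rw [List.drop_eq_getElem_cons h2, pvMerge, if_neg hns, ← List.drop_eq_getElem_cons h2]
      · have hnil : program.drop (i+1) = [] := by
          rw [List.drop_eq_nil_iff]; omega
        rw [hnil]; simp [pvMerge]
  | case3 i h =>
      rw [List.drop_eq_nil_iff.mpr (by omega), pvMerge]

-- pvMerge keeps a non-label head unchanged
lemma pvMerge_cons_not (r : String) (rest : List String)
    (h : ¬ PySem.Str.endswith r ":" = true) :
    pvMerge (r :: rest) = r :: pvMerge rest := by
  cases rest with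
  | nil => rfl
  | cons s t => rw [pvMerge, if_neg h]

-- the findRun scan delimits a maximal run of labels
lemma pv_findRun_spec (program : List String) (j : Nat) :
    (∀ t, j ≤ t → t < pv_findRun program j →
        PySem.Str.endswith (program.getD t "") ":" = true) ∧
    (pv_findRun program j < program.length →
        ¬ PySem.Str.endswith (program.getD (pv_findRun program j) "") ":" = true) ∧
    (j ≤ program.length → pv_findRun program j ≤ program.length) := by
  fun_induction pv_findRun program j with
  | case1 j h ih =>
      refine ⟨fun t ht1 ht2 => ?_, ih.2.1, fun _ => ih.2.2 (by omega)⟩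
      rcases Nat.eq_or_lt_of_le ht1 with rfl | hlt
      · exact h.2
      · exact ih.1 t hlt ht2
  | case2 j h =>
      refine ⟨fun t ht1 ht2 => by omega, fun hlt he => h ⟨hlt, he⟩, fun hle => ?_⟩
      by_cases hj : j < program.length
      · exact le_of_lt hj
      · omega

-- what pvMerge emits after the paired run: the leftover label and/or the boundary line
def pv_tailPart (run rest : List String) : List String :=
  if run.length % 2 = 1 then
    match rest with
    | [] => [run.getLast?.getD ""]
    | r :: rest' => (run.getLast?.getD "" ++ " " ++ r) :: pvMerge rest'
  else
    match rest with
    | [] => []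
    | r :: rest' => r :: pvMerge rest'

-- pvMerge of a run of labels up to a non-label boundary: pair the run, then absorb the boundary
-- line when the run length is odd
lemma pv_merge_run (run rest : List String)
    (hrun : ∀ x ∈ run, PySem.Str.endswith x ":" = true)
    (hrest : ∀ r, rest.head? = some r → ¬ PySem.Str.endswith r ":" = true) :
    pvMerge (run ++ rest) = pv_pairUp run ++ pv_tailPart run rest := by
  induction run using pv_pairUp.induct with
  | case1 =>
      cases rest with
      | nil => simp [pvMerge, pv_pairUp, pv_tailPart]
      | cons r rest' =>
          rw [List.nil_append, pvMerge_cons_not r rest' (hrest r rfl)]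
          simp [pv_pairUp, pv_tailPart]
  | case2 x =>
      have hx : PySem.Str.endswith x ":" = true := hrun x (by simp)
      cases rest with
      | nil => simp [pvMerge, pv_pairUp, pv_tailPart]
      | cons r rest' =>
          rw [List.cons_append, List.nil_append, pvMerge, if_pos hx]
          simp [pv_pairUp, pv_tailPart]
  | case3 x y r ih =>
      have hx : PySem.Str.endswith x ":" = true := hrun x (by simp)
      rw [List.cons_append, List.cons_append, pvMerge, if_pos hx, pv_pairUp, List.cons_append]
      rw [ih (fun z hz => hrun z (by simp [hz]))]
      congr 1
      unfold pv_tailPart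
      have hpar : (x :: y :: r).length % 2 = r.length % 2 := by
        simp only [List.length_cons]; omega
      rw [hpar]
      by_cases hodd : r.length % 2 = 1
      · have hr : r ≠ [] := by intro hnil; rw [hnil] at hodd; simp at hodd
        have hg : (x :: y :: r).getLast? = r.getLast? := by
          cases r with
          | nil => exact absurd rfl hr
          | cons a l => rw [List.getLast?_cons_cons, List.getLast?_cons_cons]
        rw [hg]
      · rw [if_neg hodd, if_neg hodd]

-- B's outer loop from index i appends pvMerge of the remaining suffix to the accumulator
lemma pv_goB (program : List String) :
    ∀ (i : Nat) (out : List String),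
      inline_labels_py_alt_go program i out = out ++ pvMerge (program.drop i) := by
  intro i out
  fun_induction inline_labels_py_alt_go program i out with
  | case1 i out h j run out1 out2 ih =>
      have hij : i ≤ j := pv_findRun_ge program i
      have hspec := pv_findRun_spec program i
      have hjlen : j ≤ program.length := hspec.2.2 (le_of_lt h)
      have hrunval : run = (program.drop i).take (j - i) := by
        simp [run, PySem.List.slice_natCast]
      have hsplit : program.drop i = run ++ program.drop j := by
        rw [hrunval]
        conv_lhs => rw [← List.take_append_drop (j - i) (program.drop i)]
        congr 1
        rw [List.drop_drop]
        congr 1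
        omega
      have hrunlab : ∀ x ∈ run, PySem.Str.endswith x ":" = true := by
        intro x hx
        rw [hrunval] at hx
        obtain ⟨t, ht, rfl⟩ := List.mem_iff_getElem.mp hx
        have ht' : t < j - i := by
          have := List.length_take_le (j - i) (program.drop i); omega
        have hlt : i + t < program.length := by
          have := ht; simp [List.length_take, List.length_drop] at this; omega
        have := hspec.1 (i + t) (by omega) (by omega)
        rw [List.getD_eq_getElem program "" hlt] at this
        simpa [List.getElem_take, List.getElem_drop] using this
      have hrest : ∀ r, (program.drop j).head? = some r →
          ¬ PySem.Str.endswith r ":" = true := by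
        intro r hr
        rw [List.head?_drop] at hr
        have hjl : j < program.length := by
          by_contra hc
          rw [List.getElem?_eq_none (by omega)] at hr
          simp at hr
        have hrv : r = program[j] := by
          rw [List.getElem?_eq_getElem hjl] at hr
          exact (Option.some.injEq _ _ ▸ hr).symm
        have := hspec.2.1 hjl
        rwa [List.getD_eq_getElem program "" hjl, ← hrv] at this
      rw [ih, hsplit, pv_merge_run run (program.drop j) hrunlab hrest]
      have hget : (PySem.List.pyGet? run (-1)).getD "" = run.getLast?.getD "" := by
        rw [PySem.List.pyGet?_neg_one]
      by_cases hjl : j < program.length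
      · have hdropj : program.drop j = program.getD j "" :: program.drop (j + 1) := by
          rw [List.drop_eq_getElem_cons hjl, List.getD_eq_getElem program "" hjl]
        rw [hdropj]
        unfold pv_tailPart
        by_cases hodd : run.length % 2 = 1
        · simp only [out2, out1, hodd, if_pos, hjl, hget]
          simp [List.append_assoc]
        · simp only [out2, out1, hodd, hjl, if_false]
          simp [List.append_assoc]
      · have hj : j = program.length := by omega
        have hd1 : program.drop j = [] := by rw [List.drop_eq_nil_iff]; omega
        have hd2 : program.drop (j + 1) = [] := by rw [List.drop_eq_nil_iff]; omega
        rw [hd1, hd2]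
        unfold pv_tailPart
        by_cases hodd : run.length % 2 = 1
        · simp only [out2, out1, hodd, if_pos, hjl, hget]
          simp [pvMerge, List.append_assoc]
        · simp only [out2, out1, hodd, hjl, if_false]
          simp [pvMerge]
  | case2 i out h =>
      rw [List.drop_eq_nil_iff.mpr (by omega), pvMerge]
      simp

-- ===== VERDICT (by name: the statement is the Claim_ definition above) =====
theorem inline_labels_py_spec : Claim_equal_inline_labels_py := by
  intro program _ _
  unfold Spec_inline_labels_py inline_labels_py inline_labels_py_alt
  rw [pv_goA program 0, pv_goB program 0 []]
  simp
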